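-- pv_equiv track=rewrite | github.com/LingLing40Hours/counting-permutations-restricted-by-length-of-longest-consecutive-subsequence | Restricted Permutations.py | useBaseWithBuddy
-- ===== SOURCE A (Python) =====
-- def useBaseWithBuddy(n, permutation):
--     k = len(permutation);
--     for i in range(1, k):
--         if abs(permutation[i]-permutation[i-1]) == n-1: #use base
--             sideCount = 0;
--             if i+1 < k and abs(permutation[i+1]-permutation[i])==1:
--                 if i+2 >= k:
--                     sideCount += 1;
--                 elif i+2 < k and abs(permutation[i+2]-permutation[i+1])!=1:
--                     sideCount += 1;
--                 else: #two sides in a row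
--                     return False;
--             if i-2 >= 0 and abs(permutation[i-1]-permutation[i-2])==1:
--                 if i-3 < 0:
--                     sideCount += 1;
--                 elif i-3 >= 0 and abs(permutation[i-2]-permutation[i-3])!=1:
--                     sideCount += 1;
--                 else: #two sides in a row
--                     return False;
--             if sideCount==1:
--                 return True;
--             return False;
--     return False;
-- ===== SOURCE B (Python) =====
-- def useBaseWithBuddy(n, permutation):
--     k = len(permutation)
--     base = next((i for i in range(1, k)
--                  if abs(permutation[i] - permutation[i-1]) == n - 1), None)
--     if base is None:
--         return False
--
--     def run(start, step):
--         # length of the consecutive |diff|==1 run extending from index `start`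
--         count = 0
--         j = start
--         while 0 <= j + step < k and abs(permutation[j+step] - permutation[j]) == 1:
--             count += 1
--             j += step
--         return count
--
--     right = run(base, 1)
--     left = run(base - 1, -1)
--     if right >= 2 or left >= 2:
--         return False
--     return right + left == 1
-- ===== Notes on version B (the rewrite author's own statement) =====
-- stated objective: simpler
-- what changed: Replaces A's unrolled i+2/i-3 branch logic inside the scanning loop with a find-first-base step followed by a generic run-length counter walked left and right, judging the result as right>=2 or left>=2 -> False else right+left==1.
import Mathlib
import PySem

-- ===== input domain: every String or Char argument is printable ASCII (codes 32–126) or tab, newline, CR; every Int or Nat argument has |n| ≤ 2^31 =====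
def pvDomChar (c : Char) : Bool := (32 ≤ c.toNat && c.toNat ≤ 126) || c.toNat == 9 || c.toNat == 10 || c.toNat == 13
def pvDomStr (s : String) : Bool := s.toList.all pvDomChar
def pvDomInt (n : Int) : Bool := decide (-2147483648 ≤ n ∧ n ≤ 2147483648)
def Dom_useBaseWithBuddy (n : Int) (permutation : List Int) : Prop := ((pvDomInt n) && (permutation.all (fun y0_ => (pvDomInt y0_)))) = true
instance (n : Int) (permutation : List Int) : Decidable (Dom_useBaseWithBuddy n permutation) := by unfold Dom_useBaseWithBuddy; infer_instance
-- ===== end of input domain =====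

-- B re-states A's unrolled branch logic as run-length counting from the first base index (objective: simpler).

-- ===== PORT A =====
-- All A-side indexing is by guarded in-range nonnegative indices, so `.getD 0` is exact.
def pvAget (xs : List Int) (i : Int) : Int := (PySem.List.pyGet? xs i).getD 0

-- the left-side check and the final `sideCount == 1` test of A's loop body
def uLeft (p : List Int) (i sc : Int) : Bool :=
  if 0 ≤ i - 2 ∧ |pvAget p (i-1) - pvAget p (i-2)| = 1 then
    if i - 3 < 0 then decide (sc + 1 = 1)
    else if 0 ≤ i - 3 ∧ |pvAget p (i-2) - pvAget p (i-3)| ≠ 1 then decide (sc + 1 = 1)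
    else false
  else decide (sc = 1)

-- A's loop body once the base condition at index i fired: right-side check, then uLeft
def uBody (p : List Int) (k i : Int) : Bool :=
  if i + 1 < k ∧ |pvAget p (i+1) - pvAget p i| = 1 then
    if k ≤ i + 2 then uLeft p i 1
    else if i + 2 < k ∧ |pvAget p (i+2) - pvAget p (i+1)| ≠ 1 then uLeft p i 1
    else false
  else uLeft p i 0

-- the `for i in range(1, k)` loop with its early returns
def uAux (n : Int) (p : List Int) (k : Int) : List Int → Bool
  | [] => false
  | i :: rest =>
    if |pvAget p i - pvAget p (i-1)| = n - 1 then uBody p k i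
    else uAux n p k rest

def useBaseWithBuddy (n : Int) (permutation : List Int) : Bool :=
  uAux n permutation (permutation.length : Int)
    (PySem.List.pyRange 1 (permutation.length : Int) 1)

-- ===== PORT B =====
-- (reuses the exact in-range indexer pvAget; all B-side indices are also guarded in range)
-- first index i in the given index list with |p[i]-p[i-1]| == n-1
def bFindBase (n : Int) (p : List Int) : List Int → Option Int
  | [] => none
  | i :: rest => if |pvAget p i - pvAget p (i-1)| = n - 1 then some i else bFindBase n p rest

-- length of the consecutive |diff|==1 run extending from index j in direction `step`
-- (the while-loop of Source B's `run`; fuel = list length bounds the walk)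
def bRun (p : List Int) (k step : Int) : Nat → Int → Int → Int
  | 0, _, c => c
  | fuel+1, j, c =>
    if 0 ≤ j + step ∧ j + step < k ∧ |pvAget p (j+step) - pvAget p j| = 1 then
      bRun p k step fuel (j+step) (c+1)
    else c

def useBaseWithBuddy_alt (n : Int) (permutation : List Int) : Bool :=
  let k : Int := permutation.length
  match bFindBase n permutation (PySem.List.pyRange 1 k 1) with
  | none => false
  | some base =>
    let right := bRun permutation k 1 permutation.length base 0
    let left := bRun permutation k (-1) permutation.length (base - 1) 0
    if 2 ≤ right ∨ 2 ≤ left then false else decide (right + left = 1)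

-- ===== PRECONDITION & SPEC =====
def Spec_useBaseWithBuddy (n : Int) (permutation : List Int) (out : Bool) : Prop := out = useBaseWithBuddy_alt n permutation
instance (n : Int) (permutation : List Int) (out : Bool) : Decidable (Spec_useBaseWithBuddy n permutation out) := by unfold Spec_useBaseWithBuddy; infer_instance

-- ===== CLAIM (what is proved, stated in full; the proofs are below) =====
def Claim_equal_useBaseWithBuddy : Prop := ∀ (n : Int) (permutation : List Int), Dom_useBaseWithBuddy n permutation → Spec_useBaseWithBuddy n permutation (useBaseWithBuddy n permutation)

-- ===== LEMMAS AND PROOFS =====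

theorem bRun_ge (p : List Int) (k step : Int) :
    ∀ (fuel : Nat) (j c : Int), c ≤ bRun p k step fuel j c := by
  intro fuel
  induction fuel with
  | zero => intro j c; simp [bRun]
  | succ m ih =>
    intro j c
    simp only [bRun]
    split
    · exact le_trans (by omega) (ih (j+step) (c+1))
    · exact le_refl c

theorem bRun_stop (p : List Int) (k step : Int) (fuel : Nat) (j c : Int)
    (h : ¬ (0 ≤ j + step ∧ j + step < k ∧ |pvAget p (j+step) - pvAget p j| = 1)) :
    bRun p k step fuel j c = c := by
  cases fuel with
  | zero => rfl
  | succ m => simp [bRun, h]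

theorem bRun_step (p : List Int) (k step : Int) (fuel : Nat) (j c : Int)
    (h : 0 ≤ j + step ∧ j + step < k ∧ |pvAget p (j+step) - pvAget p j| = 1) :
    bRun p k step (fuel+1) j c = bRun p k step fuel (j+step) (c+1) := by
  simp [bRun, h]

-- the left-side run: uLeft equals B's left-count judgement, for sc ∈ {0,1}
theorem left_eq (p : List Int) (k : Int) (f : Nat) (i sc : Int)
    (h2 : i < k) (hsc : sc = 0 ∨ sc = 1) :
    uLeft p i sc =
      (if 2 ≤ sc ∨ 2 ≤ bRun p k (-1) (f+2) (i-1) 0 then false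
       else decide (sc + bRun p k (-1) (f+2) (i-1) 0 = 1)) := by
  by_cases hL1 : 0 ≤ i - 2 ∧ |pvAget p (i-1) - pvAget p (i-2)| = 1
  · have hc1 : 0 ≤ (i-1) + (-1) ∧ (i-1) + (-1) < k ∧
        |pvAget p ((i-1)+(-1)) - pvAget p (i-1)| = 1 := by
      refine ⟨by omega, by omega, ?_⟩
      have he : (i-1) + (-1) = i - 2 := by ring
      rw [he, abs_sub_comm]
      exact hL1.2
    rw [bRun_step p k (-1) (f+1) (i-1) 0 hc1]
    have he2 : (i-1) + (-1) = i - 2 := by ring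
    rw [he2]
    simp only [zero_add]
    by_cases hL2 : 0 ≤ i - 3 ∧ |pvAget p (i-2) - pvAget p (i-3)| = 1
    · -- two left sides in a row: both sides give false
      have hc2 : 0 ≤ (i-2) + (-1) ∧ (i-2) + (-1) < k ∧
          |pvAget p ((i-2)+(-1)) - pvAget p (i-2)| = 1 := by
        refine ⟨by omega, by omega, ?_⟩
        have he : (i-2) + (-1) = i - 3 := by ring
        rw [he, abs_sub_comm]
        exact hL2.2
      rw [bRun_step p k (-1) f (i-2) 1 hc2]
      have hge : (2:Int) ≤ bRun p k (-1) f ((i-2) + -1) (1+1) := bRun_ge p k (-1) f _ 2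
      rw [uLeft, if_pos hL1, if_neg (by omega), if_neg (by
        intro h; exact h.2 hL2.2)]
      rw [if_pos (Or.inr hge)]
    · -- exactly one left step: run = 1
      have hstop : bRun p k (-1) (f+1) (i-2) 1 = 1 := by
        apply bRun_stop
        intro h
        apply hL2
        have he : (i-2) + (-1) = i - 3 := by ring
        rw [he, abs_sub_comm] at h
        exact ⟨h.1, h.2.2⟩
      rw [hstop]
      rw [uLeft, if_pos hL1]
      by_cases h3 : 0 ≤ i - 3
      · rw [if_neg (by omega), if_pos ⟨h3, fun hd => hL2 ⟨h3, hd⟩⟩]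
        rcases hsc with h | h <;> subst h <;> simp
      · rw [if_pos (by omega)]
        rcases hsc with h | h <;> subst h <;> simp
  · -- no left step: run = 0
    have hstop : bRun p k (-1) (f+2) (i-1) 0 = 0 := by
      apply bRun_stop
      intro h
      apply hL1
      have he : (i-1) + (-1) = i - 2 := by ring
      rw [he, abs_sub_comm] at h
      exact ⟨h.1.trans_eq (by ring_nf), h.2.2⟩
    rw [hstop, uLeft, if_neg hL1]
    rcases hsc with h | h <;> subst h <;> simp

-- body equivalence at a base index i with 1 ≤ i < k = p.length
theorem body_eq (p : List Int) (i : Int)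
    (h1 : 1 ≤ i) (h2 : i < (p.length : Int)) :
    uBody p (p.length : Int) i =
      (let right := bRun p (p.length : Int) 1 p.length i 0
       let left := bRun p (p.length : Int) (-1) p.length (i - 1) 0
       if 2 ≤ right ∨ 2 ≤ left then false else decide (right + left = 1)) := by
  have hlen2 : 2 ≤ p.length := by
    by_contra h
    interval_cases hl : p.length <;> simp_all <;> omega
  obtain ⟨f, hf⟩ : ∃ f, p.length = f + 2 := ⟨p.length - 2, by omega⟩
  set k : Int := (p.length : Int) with hk
  simp only [hf]
  by_cases hR1 : i + 1 < k ∧ |pvAget p (i+1) - pvAget p i| = 1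
  · have hc1 : 0 ≤ i + 1 ∧ i + 1 < k ∧ |pvAget p (i+1) - pvAget p i| = 1 := by
      exact ⟨by omega, hR1.1, hR1.2⟩
    rw [bRun_step p k 1 (f+1) i 0 hc1]
    simp only [zero_add]
    by_cases hR2 : i + 2 < k ∧ |pvAget p (i+2) - pvAget p (i+1)| = 1
    · -- two right sides in a row: both false
      have hc2 : 0 ≤ (i+1) + 1 ∧ (i+1) + 1 < k ∧
          |pvAget p ((i+1)+1) - pvAget p (i+1)| = 1 := by
        refine ⟨by omega, by omega, ?_⟩
        have he : (i+1) + 1 = i + 2 := by ring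
        rw [he]
        exact hR2.2
      rw [bRun_step p k 1 f (i+1) 1 hc2]
      have hge : (2:Int) ≤ bRun p k 1 f ((i+1) + 1) (1+1) := bRun_ge p k 1 f _ 2
      rw [uBody, if_pos hR1, if_neg (by omega), if_neg (by
        intro h; exact h.2 hR2.2)]
      rw [if_pos (Or.inl hge)]
    · -- exactly one right step: run = 1
      have hstop : bRun p k 1 (f+1) (i+1) 1 = 1 := by
        apply bRun_stop
        intro h
        apply hR2
        have he : (i+1) + 1 = i + 2 := by ring
        rw [he] at h
        exact ⟨h.2.1.trans_eq (by ring_nf), h.2.2⟩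
      rw [hstop]
      rw [uBody, if_pos hR1]
      by_cases h3 : k ≤ i + 2
      · rw [if_pos h3]
        exact left_eq p k f i 1 h2 (Or.inr rfl)
      · rw [if_neg h3, if_pos ⟨by omega, fun hd => hR2 ⟨by omega, hd⟩⟩]
        exact left_eq p k f i 1 h2 (Or.inr rfl)
  · -- no right step: run = 0
    have hstop : bRun p k 1 (f+2) i 0 = 0 := by
      apply bRun_stop
      intro h
      apply hR1
      exact ⟨h.2.1, h.2.2⟩
    rw [hstop, uBody, if_neg hR1]
    exact left_eq p k f i 0 h2 (Or.inl rfl)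

theorem find_bridge (n : Int) (p : List Int) :
    ∀ L : List Int, (∀ i ∈ L, 1 ≤ i ∧ i < (p.length : Int)) →
      uAux n p (p.length : Int) L =
        (match bFindBase n p L with
         | none => false
         | some base =>
           let right := bRun p (p.length : Int) 1 p.length base 0
           let left := bRun p (p.length : Int) (-1) p.length (base - 1) 0
           if 2 ≤ right ∨ 2 ≤ left then false else decide (right + left = 1)) := by
  intro L
  induction L with
  | nil => intro _; rfl
  | cons i rest ih =>
    intro hmem
    obtain ⟨hi1, hi2⟩ := hmem i (List.mem_cons_self ..)
    simp only [uAux, bFindBase]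
    split
    · exact body_eq p i hi1 hi2
    · exact ih (fun j hj => hmem j (List.mem_cons_of_mem _ hj))

-- ===== VERDICT (by name: the statement is the Claim_ definition above) =====
theorem useBaseWithBuddy_spec : Claim_equal_useBaseWithBuddy := by
  intro n p _
  unfold Spec_useBaseWithBuddy useBaseWithBuddy useBaseWithBuddy_alt
  exact find_bridge n p _ (fun i hi => by
    have := PySem.List.mem_pyRange_one.mp hi
    omega)
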